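-- pv_equiv track=rewrite | github.com/noodlemaster/NCC_2018 | src/tools/hill_climbing.py | get_existing_letter
-- ===== SOURCE A (Python) =====
-- def alphabets():
--     alphabets = ['A', 'B', 'C', 'D', 'E', 'F', 'G', 'H', 'I', 'J', 'K', 'L', 'M', 'N', 'O', 'P', 'Q', 'R', 'S', 'T', 'U',
--              'V', 'W', 'X', 'Y', 'Z']
--     return alphabets
--
-- def get_existing_letter(key):
--     al = alphabets()
--     l = list(set(list(key)))
--     result = []
--     for each in al:
--         if each not in l:
--             result.append(each)
--     return result
-- ===== SOURCE B (Python) =====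
-- def alphabets():
--     alphabets = ['A', 'B', 'C', 'D', 'E', 'F', 'G', 'H', 'I', 'J', 'K', 'L', 'M', 'N', 'O', 'P', 'Q', 'R', 'S', 'T', 'U',
--              'V', 'W', 'X', 'Y', 'Z']
--     return alphabets
--
-- def get_existing_letter(key):
--     return sorted(set(alphabets()) - set(key))
-- ===== Notes on version B (the rewrite author's own statement) =====
-- stated objective: simpler
-- what changed: Replaces the explicit scan of the 26-letter list with a membership filter by a single set difference set(alphabets()) - set(key) followed by sorted() to restore A-Z order.
import Mathlib
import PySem

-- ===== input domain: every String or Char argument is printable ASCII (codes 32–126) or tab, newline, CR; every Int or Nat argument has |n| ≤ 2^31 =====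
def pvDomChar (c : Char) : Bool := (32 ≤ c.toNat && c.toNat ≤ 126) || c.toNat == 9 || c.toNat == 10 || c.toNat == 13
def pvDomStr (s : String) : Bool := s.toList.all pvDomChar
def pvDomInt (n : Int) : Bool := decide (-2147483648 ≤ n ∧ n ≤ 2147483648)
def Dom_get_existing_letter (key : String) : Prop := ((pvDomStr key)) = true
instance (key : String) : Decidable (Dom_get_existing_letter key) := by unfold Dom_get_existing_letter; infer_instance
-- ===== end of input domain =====

-- B replaces A's scan-and-filter over the 26-letter list by a set difference followed by sorted(); objective: simpler.

-- ===== PORT A =====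
def pvAlphabets : List String :=
  ["A", "B", "C", "D", "E", "F", "G", "H", "I", "J", "K", "L", "M", "N", "O", "P", "Q", "R", "S", "T", "U",
   "V", "W", "X", "Y", "Z"]

def get_existing_letter (key : String) : List String :=
  let al := pvAlphabets
  -- l = list(set(list(key))) — used only for membership, so set order is irrelevant
  let l := PySem.Set.ofList (key.toList.map (fun c => String.ofList [c]))
  al.foldl (fun result each => if !(l.contains each) then result ++ [each] else result) []

-- ===== PORT B =====
def get_existing_letter_alt (key : String) : List String :=
  PySem.List.sorted
    (PySem.Set.diff (PySem.Set.ofList pvAlphabets)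
      (PySem.Set.ofList (key.toList.map (fun c => String.ofList [c]))))
    (fun s => s)

-- ===== PRECONDITION & SPEC =====
def Spec_get_existing_letter (key : String) (out : List String) : Prop := out = get_existing_letter_alt key
instance (key : String) (out : List String) : Decidable (Spec_get_existing_letter key out) := by unfold Spec_get_existing_letter; infer_instance

-- ===== CLAIM (what is proved, stated in full; the proofs are below) =====
def Claim_equal_get_existing_letter : Prop := ∀ (key : String), Dom_get_existing_letter key → Spec_get_existing_letter key (get_existing_letter key)

-- ===== LEMMAS AND PROOFS =====

theorem pvAlphabets_nodup : pvAlphabets.Nodup := by decide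

theorem pvAlphabets_pairwise_le : pvAlphabets.Pairwise (fun a b : String => a ≤ b) := by
  have h : pvAlphabets.Pairwise (fun a b : String => a.toList ≤ b.toList) := by decide
  exact h.imp (fun hab => String.le_iff_toList_le.mpr hab)

-- ===== VERDICT (by name: the statement is the Claim_ definition above) =====
theorem get_existing_letter_spec : Claim_equal_get_existing_letter := by
  intro key _
  unfold Spec_get_existing_letter get_existing_letter get_existing_letter_alt
  simp only [PySem.Set.diff, PySem.Set.ofList_eq_self_of_nodup _ pvAlphabets_nodup]
  rw [PySem.List.foldl_append_if_eq_filter, List.nil_append,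
    PySem.List.sorted_eq_self_of_pairwise _ _ (List.Pairwise.filter _ pvAlphabets_pairwise_le)]
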